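-- pv_equiv track=rewrite | github.com/BerkeleyLab/Bedrock | peripheral_drivers/i2cbridge/ramtest.py | pause
-- ===== SOURCE A (Python) =====
-- o_p1 = 0x80
--
-- o_p2 = 0xa0
--
-- def pause(n):
--     r = []
--     while n >= 992:
--         r += [o_p2 + 31]
--         n -= 31*32
--     if n > 32:
--         x = int(n/32)
--         r += [o_p2 + x]
--         n -= x*32
--     if n > 0:
--         r += [o_p1 + n]
--     return r
-- ===== SOURCE B (Python) =====
-- o_p1 = 0x80
--
-- o_p2 = 0xa0
--
-- def pause(n):
--     k = int(n // 992) if n >= 992 else 0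
--     m = n - 992 * k
--     r = [o_p2 + 31] * k
--     if m > 32:
--         x = int(m / 32)
--         r += [o_p2 + x]
--         m -= x * 32
--     if m > 0:
--         r += [o_p1 + m]
--     return r
-- ===== Notes on version B (the rewrite author's own statement) =====
-- stated objective: simpler
-- what changed: Replaced the counting while-loop (append one full-pause byte and subtract a block per iteration) by a closed-form floor division with list replication; the remainder handling keeps A's two branches.
import Mathlib
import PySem

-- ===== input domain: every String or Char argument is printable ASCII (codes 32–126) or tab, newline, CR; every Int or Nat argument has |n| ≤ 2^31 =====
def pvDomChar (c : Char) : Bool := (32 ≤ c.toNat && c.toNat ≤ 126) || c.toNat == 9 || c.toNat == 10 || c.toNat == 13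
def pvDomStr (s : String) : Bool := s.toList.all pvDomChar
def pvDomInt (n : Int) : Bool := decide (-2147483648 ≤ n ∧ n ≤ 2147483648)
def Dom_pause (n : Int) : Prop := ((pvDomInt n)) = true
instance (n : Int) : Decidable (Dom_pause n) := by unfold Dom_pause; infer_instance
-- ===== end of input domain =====

-- B replaces A's counting while-loop by a closed-form division and list replication (simpler; same remainder handling).

-- ===== PORT A =====
-- the two trailing 'if' branches of A, applied to the value of n after the loop
-- (int(n/32) with 32 < n < 992: float division by a power of two is exact, so it equals Euclidean n / 32 here)
def pauseRestA (n : Int) : List Int :=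
  let p := if n > 32 then ([0xa0 + n / 32], n - (n / 32) * 32) else ([], n)
  if p.2 > 0 then p.1 ++ [0x80 + p.2] else p.1

-- the while-loop of A: r += [o_p2 + 31]; n -= 31*32 while n >= 992, then the tail
def pauseLoopA (r : List Int) (n : Int) : List Int :=
  if 992 ≤ n then pauseLoopA (r ++ [0xa0 + 31]) (n - 31 * 32)
  else r ++ pauseRestA n
termination_by n.toNat
decreasing_by omega

def pause (n : Int) : List Int := pauseLoopA [] n

-- ===== PORT B =====
-- the two 'if' branches of Source B applied to the remainder m (same code as A keeps, per Source B)
def pauseRestB (m : Int) : List Int :=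
  let p := if m > 32 then ([0xa0 + m / 32], m - (m / 32) * 32) else ([], m)
  if p.2 > 0 then p.1 ++ [0x80 + p.2] else p.1

def pause_alt (n : Int) : List Int :=
  let k : Int := if 992 ≤ n then n / 992 else 0
  let m : Int := n - 992 * k
  List.replicate k.toNat (0xa0 + 31) ++ pauseRestB m

-- ===== PRECONDITION & SPEC =====
def Spec_pause (n : Int) (out : List Int) : Prop := out = pause_alt n
instance (n : Int) (out : List Int) : Decidable (Spec_pause n out) := by unfold Spec_pause; infer_instance

-- ===== CLAIM (what is proved, stated in full; the proofs are below) =====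
def Claim_equal_pause : Prop := ∀ (n : Int), Dom_pause n → Spec_pause n (pause n)

-- ===== LEMMAS AND PROOFS =====

theorem pauseLoopA_eq (r : List Int) (n : Int) :
    pauseLoopA r n =
      r ++ (List.replicate (if 992 ≤ n then n / 992 else 0).toNat (0xa0 + 31) ++
        pauseRestA (n - 992 * (if 992 ≤ n then n / 992 else 0))) := by
  rw [pauseLoopA]
  by_cases h : 992 ≤ n
  · rw [pauseLoopA_eq (r ++ [0xa0 + 31]) (n - 31 * 32)]
    have hq : 1 ≤ n / 992 := by omega
    by_cases h2 : 992 ≤ n - 31 * 32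
    · have he : (n - 31 * 32) / 992 = n / 992 - 1 := by omega
      have ht : (n / 992).toNat = (n / 992 - 1).toNat + 1 := by omega
      simp only [h, h2, if_pos, he, ht, List.replicate_succ, List.append_assoc,
        List.cons_append, List.nil_append]
      have : n - 31 * 32 - 992 * (n / 992 - 1) = n - 992 * (n / 992) := by ring
      rw [this]
    · have he : n / 992 = 1 := by omega
      simp only [h, h2, if_pos, he]
      norm_num
  · simp [h]
termination_by n.toNat
decreasing_by omega

theorem restB_eq_restA (m : Int) : pauseRestB m = pauseRestA m := rfl

-- ===== VERDICT (by name: the statement is the Claim_ definition above) =====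
theorem pause_spec : Claim_equal_pause := by
  intro n _
  show pause n = pause_alt n
  rw [pause, pauseLoopA_eq, pause_alt]
  simp [restB_eq_restA]
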